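-- pv_equiv track=rewrite | github.com/WalidRAMTANI/Personal-Projects | python/traps_game/traps_game/affichage.py | cherche_tour
-- ===== SOURCE A (Python) =====
-- def cherche_tour(tour: int , joueur: dict):
--     """
--     tour: nombre representant le joueur precedent a avoir jouer
--     joueur: association du jour et de son nombre de balle
--     determine le tour du prohai  joueur
--     >>> cherche_tour(2,{"green":0, "red":0, "blue":0, "yellow":1})
--     3
--     >>> cherche_tour(2,{"green":0, "red":1, "blue":0, "yellow":0})
--     1
--     """
--     #verifie qu'il reste au moins une balle
--     assert ([0] * len(joueur)) != list(joueur.values())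
--     #prend le joueur suivant
--     if tour == len(joueur) - 1:#si on est a la fin de la liste
--         tour = 0
--     else:#si on est pas a la fin de la liste
--         tour += 1
--     couleur = list(joueur.keys())[tour] #prend la couleur du joueur actuel
--     if joueur[couleur] == 0: #verifie si il a pas une balle en jeu
--         tour = cherche_tour(tour, joueur)#on recherche avec le joueur suivant
--     return  tour
-- ===== SOURCE B (Python) =====
-- def cherche_tour(tour: int, joueur: dict):
--     vals = list(joueur.values())
--     assert [0] * len(vals) != vals
--     pos = 0 if tour == len(vals) - 1 else tour + 1
--     while vals[pos] == 0:
--         pos = 0 if pos == len(vals) - 1 else pos + 1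
--     return pos
-- ===== Notes on version B (the rewrite author's own statement) =====
-- stated objective: simpler
-- what changed: B replaces A's recursive descent through keys-then-dict-lookup by a plain iterative while loop that scans the values list directly by position, eliminating the key indirection and the recursion.
import Mathlib
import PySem

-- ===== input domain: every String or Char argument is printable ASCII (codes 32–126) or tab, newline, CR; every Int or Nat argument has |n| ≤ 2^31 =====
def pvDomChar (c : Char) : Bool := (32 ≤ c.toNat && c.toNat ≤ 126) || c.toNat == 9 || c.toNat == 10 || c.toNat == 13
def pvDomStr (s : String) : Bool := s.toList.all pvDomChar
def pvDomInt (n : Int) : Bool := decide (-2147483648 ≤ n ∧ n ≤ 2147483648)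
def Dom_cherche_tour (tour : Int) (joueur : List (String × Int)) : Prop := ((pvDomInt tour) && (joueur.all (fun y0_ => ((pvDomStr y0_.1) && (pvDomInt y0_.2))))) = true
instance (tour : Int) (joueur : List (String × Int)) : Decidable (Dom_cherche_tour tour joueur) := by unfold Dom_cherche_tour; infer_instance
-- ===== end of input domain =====

-- B replaces A's recursion through keys + dict lookup by an iterative while loop scanning the
-- values list directly; equivalence is proved on the inputs where the Python A returns normally.

-- ===== PORT A =====
-- A's recursion, with a fuel guard making the recursion total (inside Pre_ the fuel
-- 2*size+1 is proved sufficient, so the fuel-0 branch is never reached there).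
def chercheTourGo : Nat → Int → PySem.Dict String Int → Int
  | 0, tour, _ => tour
  | f+1, tour, d =>
    -- prend le joueur suivant
    let t := if tour = (d.size : Int) - 1 then 0 else tour + 1
    -- couleur = list(joueur.keys())[tour]  (none = IndexError, excluded by Pre_)
    match PySem.List.pyGet? d.keys t with
    | none => t
    | some c =>
      -- joueur[couleur]  (key comes from d.keys, so the none branch is unreachable)
      match d.get? c with
      | none => t
      | some v => if v = 0 then chercheTourGo f t d else t

def cherche_tour (tour : Int) (joueur : List (String × Int)) : Int :=
  -- the Python argument is a dict: model dict(joueur) (duplicate keys overwrite in place)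
  chercheTourGo (2 * (PySem.Dict.ofList joueur).size + 1) tour (PySem.Dict.ofList joueur)

-- ===== PORT B =====
-- B's while loop 'while vals[pos] == 0: pos = 0 if pos == len(vals)-1 else pos+1',
-- with the same fuel guard (sufficient inside Pre_).
def loopB : Nat → List Int → Int → Int
  | 0, _, pos => pos
  | f+1, vals, pos =>
    match PySem.List.pyGet? vals pos with
    | none => pos
    | some v => if v = 0 then loopB f vals (if pos = (vals.length : Int) - 1 then 0 else pos + 1) else pos

def cherche_tour_alt (tour : Int) (joueur : List (String × Int)) : Int :=
  let vals := (PySem.Dict.ofList joueur).values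
  loopB (2 * vals.length + 1) vals (if tour = (vals.length : Int) - 1 then 0 else tour + 1)

-- ===== PRECONDITION & SPEC =====
-- Pre_ is exactly where the Python A returns: the dict has a nonzero value (otherwise the
-- assert raises AssertionError) and tour ∈ [-size-1, size-1] (otherwise the keys indexing
-- raises IndexError).
def Pre_cherche_tour (tour : Int) (joueur : List (String × Int)) : Prop :=
  (∃ v ∈ (PySem.Dict.ofList joueur).values, v ≠ 0) ∧
  -((PySem.Dict.ofList joueur).size : Int) - 1 ≤ tour ∧
  tour ≤ ((PySem.Dict.ofList joueur).size : Int) - 1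
instance (tour : Int) (joueur : List (String × Int)) : Decidable (Pre_cherche_tour tour joueur) := by
  unfold Pre_cherche_tour; infer_instance

def pvWitness_cherche_tour : Int × (List (String × Int)) :=
  (2, [("green", 0), ("red", 0), ("blue", 0), ("yellow", 1)])

def Spec_cherche_tour (tour : Int) (joueur : List (String × Int)) (out : Int) : Prop := out = cherche_tour_alt tour joueur
instance (tour : Int) (joueur : List (String × Int)) (out : Int) : Decidable (Spec_cherche_tour tour joueur out) := by unfold Spec_cherche_tour; infer_instance

-- ===== CLAIM (what is proved, stated in full; the proofs are below) =====
def Claim_equal_cherche_tour : Prop := ∀ (tour : Int) (joueur : List (String × Int)), Dom_cherche_tour tour joueur → Pre_cherche_tour tour joueur → Spec_cherche_tour tour joueur (cherche_tour tour joueur)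

-- ===== LEMMAS AND PROOFS =====

def advP (n pos : Int) : Int := if pos = n - 1 then 0 else pos + 1

def completesB : Nat → List Int → Int → Bool
  | 0, _, _ => false
  | f+1, vals, pos =>
    match PySem.List.pyGet? vals pos with
    | none => true
    | some v => if v = 0 then completesB f vals (advP (vals.length : Int) pos) else true

lemma pyGet?_map {α β : Type} (f : α → β) (xs : List α) (t : Int) :
    PySem.List.pyGet? (xs.map f) t = (PySem.List.pyGet? xs t).map f := by
  simp [PySem.List.pyGet?]

lemma dict_size_eq_values_length (d : PySem.Dict String Int) :
    d.size = d.values.length := by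
  simp [PySem.Dict.size, PySem.Dict.values]

lemma loop_eq (d : PySem.Dict String Int) (hnd : d.keys.Nodup) :
    ∀ (f : Nat) (pos : Int),
      completesB f d.values (advP (d.values.length : Int) pos) = true →
      chercheTourGo f pos d = loopB f d.values (advP (d.values.length : Int) pos) := by
  intro f
  induction f with
  | zero => intro pos h; simp [completesB] at h
  | succ f ih =>
    intro pos h
    have hkeys : d.keys = d.items.map Prod.fst := rfl
    have hvals : d.values = d.items.map Prod.snd := rfl
    have hsz : ((d.size : Int)) = ((d.values.length : Int)) := by
      rw [dict_size_eq_values_length]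
    have hadv : (if pos = (d.size : Int) - 1 then 0 else pos + 1)
        = advP (d.values.length : Int) pos := by rw [advP, hsz]
    set t := advP (d.values.length : Int) pos with htdef
    rcases hpg : PySem.List.pyGet? d.items t with _ | p
    · have hk : PySem.List.pyGet? d.keys t = none := by rw [hkeys, pyGet?_map, hpg]; rfl
      have hv : PySem.List.pyGet? d.values t = none := by rw [hvals, pyGet?_map, hpg]; rfl
      simp [chercheTourGo, loopB, hadv, hk, hv]
    · have hk : PySem.List.pyGet? d.keys t = some p.1 := by rw [hkeys, pyGet?_map, hpg]; rfl
      have hv : PySem.List.pyGet? d.values t = some p.2 := by rw [hvals, pyGet?_map, hpg]; rfl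
      have hpmem : (p.1, p.2) ∈ d.items := by
        simpa using PySem.List.mem_of_pyGet?_eq_some _ hpg
      have hget : d.get? p.1 = some p.2 := PySem.Dict.get?_of_mem_items d hpmem hnd
      by_cases hz : p.2 = 0
      · have hcomp : completesB f d.values (advP (d.values.length : Int) t) = true := by
          rw [completesB] at h
          rw [hv] at h
          simpa [hz] using h
        have := ih t hcomp
        simp only [chercheTourGo, loopB, hadv, hk, hv, hget, hz]
        simpa [advP] using this
      · simp [chercheTourGo, loopB, hadv, hk, hv, hget, hz]

lemma completesB_mono (vals : List Int) :
    ∀ (f g : Nat) (pos : Int), f ≤ g →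
      completesB f vals pos = true → completesB g vals pos = true := by
  intro f
  induction f with
  | zero => intro g pos _ h; simp [completesB] at h
  | succ f ih =>
    intro g pos hle h
    obtain ⟨g', rfl⟩ : ∃ g', g = g' + 1 := ⟨g - 1, by omega⟩
    rw [completesB] at h ⊢
    rcases hp : PySem.List.pyGet? vals pos with _ | v
    · rfl
    · rw [hp] at h
      by_cases hz : v = 0
      · simp only [hz] at h ⊢
        exact ih g' _ (by omega) h
      · simp [hz]

-- forward scan: a nonzero value at i + k is found within k+1 steps
lemma completes_fwd (vals : List Int) :
    ∀ (k i : Nat), i + k < vals.length → vals.getD (i + k) 0 ≠ 0 →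
      completesB (k + 1) vals (i : Int) = true := by
  intro k
  induction k with
  | zero =>
    intro i hlt hnz
    have hi : i < vals.length := by omega
    rw [completesB]
    simp only [PySem.List.pyGet?_natCast, List.getElem?_eq_getElem hi]
    have : vals[i] ≠ 0 := by
      rw [← List.getD_eq_getElem vals 0 hi]; simpa using hnz
    simp [this]
  | succ k ih =>
    intro i hlt hnz
    have hi : i < vals.length := by omega
    rw [completesB]
    simp only [PySem.List.pyGet?_natCast, List.getElem?_eq_getElem hi]
    by_cases hz : vals[i] = 0
    · have hne : (i : Int) ≠ (vals.length : Int) - 1 := by omega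
      have hadv : advP (vals.length : Int) (i : Int) = ((i + 1 : Nat) : Int) := by
        rw [advP, if_neg hne]; push_cast; ring
      simp only [hz, hadv]
      exact ih (i + 1) (by omega) (by simpa [Nat.add_assoc, Nat.add_comm 1 k] using hnz)
    · simp [hz]

-- skipping a tail of zeros reaches position 0
lemma completes_zeros (vals : List Int) :
    ∀ (m i : Nat), i + m = vals.length → 0 < m →
      (∀ l, i ≤ l → l < vals.length → vals.getD l 0 = 0) →
      ∀ f, completesB (m + f) vals (i : Int) = completesB f vals 0 := by
  intro m
  induction m with
  | zero => intro i _ h; omega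
  | succ m ih =>
    intro i hsum _ hzeros f
    have hi : i < vals.length := by omega
    have hz : vals[i] = 0 := by
      rw [← List.getD_eq_getElem vals 0 hi]; exact hzeros i le_rfl hi
    rw [show m + 1 + f = (m + f) + 1 by omega, completesB]
    simp only [PySem.List.pyGet?_natCast, List.getElem?_eq_getElem hi, hz]
    rcases Nat.eq_zero_or_pos m with hm | hm
    · subst hm
      have hadv : advP (vals.length : Int) (i : Int) = 0 := by
        simp only [advP]; rw [if_pos (by omega)]
      rw [hadv]
      simp
    · have hne : (i : Int) ≠ (vals.length : Int) - 1 := by omega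
      have hadv : advP (vals.length : Int) (i : Int) = ((i + 1 : Nat) : Int) := by
        rw [advP, if_neg hne]; push_cast; ring
      rw [hadv]
      exact ih (i + 1) (by omega) hm (fun l hl1 hl2 => hzeros l (by omega) hl2) f

-- Python's negative indexing: the loop from a negative position behaves as from pos + len
lemma completes_neg (vals : List Int) :
    ∀ (f : Nat) (pos : Int), -(vals.length : Int) ≤ pos → pos < 0 →
      completesB f vals pos = completesB f vals (pos + (vals.length : Int)) := by
  intro f
  induction f with
  | zero => intro pos _ _; rfl
  | succ f ih =>
    intro pos h1 h2
    have hn : 0 < vals.length := by omega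
    set k : Nat := (-pos).toNat with hk
    have hkpos : 0 < k := by omega
    have hkle : k ≤ vals.length := by omega
    have hpos : pos = -(k : Int) := by omega
    have hg1 : PySem.List.pyGet? vals pos = vals[vals.length - k]? := by
      rw [hpos]; exact PySem.List.pyGet?_neg_natCast vals k hkpos hkle
    have hg2 : PySem.List.pyGet? vals (pos + (vals.length : Int)) = vals[vals.length - k]? := by
      have : pos + (vals.length : Int) = ((vals.length - k : Nat) : Int) := by
        push_cast [Nat.cast_sub hkle]; omega
      rw [this, PySem.List.pyGet?_natCast]
    have hlt : vals.length - k < vals.length := by omega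
    rw [completesB, completesB, hg1, hg2, List.getElem?_eq_getElem hlt]
    by_cases hz : vals[vals.length - k] = 0
    · simp only [hz]
      have hne1 : pos ≠ (vals.length : Int) - 1 := by omega
      rcases eq_or_lt_of_le (show pos ≤ -1 by omega) with he | hlt2
      · -- pos = -1 : both sides advance to 0
        have hadv1 : advP (vals.length : Int) pos = 0 := by
          rw [advP, if_neg hne1]; omega
        have hadv2 : advP (vals.length : Int) (pos + (vals.length : Int)) = 0 := by
          rw [advP, if_pos (by omega)]
        rw [hadv1, hadv2]
      · -- pos < -1 : both advance by one, still negative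
        have hadv1 : advP (vals.length : Int) pos = pos + 1 := by
          rw [advP, if_neg hne1]
        have hne2 : pos + (vals.length : Int) ≠ (vals.length : Int) - 1 := by omega
        have hadv2 : advP (vals.length : Int) (pos + (vals.length : Int)) = (pos + 1) + (vals.length : Int) := by
          rw [advP, if_neg hne2]; ring
        rw [hadv1, hadv2]
        exact ih (pos + 1) (by omega) (by omega)
    · simp [hz]

lemma completes_of_exists (vals : List Int)
    (hnz : ∃ j : Nat, j < vals.length ∧ vals.getD j 0 ≠ 0) (pos : Int)
    (h1 : -(vals.length : Int) ≤ pos) (h2 : pos < (vals.length : Int)) :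
    completesB (2 * vals.length + 1) vals pos = true := by
  obtain ⟨j, hj, hjnz⟩ := hnz
  -- reduce to a natural starting index i0
  obtain ⟨i0, hi0lt, hstart⟩ :
      ∃ i0 : Nat, i0 < vals.length ∧
        completesB (2 * vals.length + 1) vals pos
          = completesB (2 * vals.length + 1) vals (i0 : Int) := by
    rcases le_or_gt 0 pos with hge | hlt
    · exact ⟨pos.toNat, by omega, by rw [Int.toNat_of_nonneg hge]⟩
    · refine ⟨(pos + (vals.length : Int)).toNat, by omega, ?_⟩
      rw [completes_neg vals _ pos h1 hlt, Int.toNat_of_nonneg (by omega)]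
    -- from i0, find the nonzero value within 2*len steps
  rw [hstart]
  by_cases hfwd : ∃ l : Nat, i0 ≤ l ∧ l < vals.length ∧ vals.getD l 0 ≠ 0
  · obtain ⟨l, hl1, hl2, hl3⟩ := hfwd
    refine completesB_mono vals (l - i0 + 1) _ _ (by omega) ?_
    have := completes_fwd vals (l - i0) i0 (by omega) (by rwa [show i0 + (l - i0) = l by omega])
    exact this
  · push Not at hfwd
    have hzeros : ∀ l, i0 ≤ l → l < vals.length → vals.getD l 0 = 0 := fun l a b => hfwd l a b
    have hjlt : j < i0 := by
      by_contra hc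
      exact hjnz (hzeros j (by omega) hj)
    have hZ := completes_zeros vals (vals.length - i0) i0 (by omega) (by omega) hzeros (j + 1)
    have hF := completes_fwd vals j 0 (by omega) (by simpa using hjnz)
    refine completesB_mono vals ((vals.length - i0) + (j + 1)) _ _ (by omega) ?_
    rw [hZ]
    simpa using hF

theorem main_equiv : ∀ (tour : Int) (joueur : List (String × Int)),
    Pre_cherche_tour tour joueur → cherche_tour tour joueur = cherche_tour_alt tour joueur := by
  intro tour joueur hpre
  obtain ⟨⟨v, hvmem, hvnz⟩, hlo, hhi⟩ := hpre
  unfold cherche_tour cherche_tour_alt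
  set d := PySem.Dict.ofList joueur with hd
  have hnd : d.keys.Nodup := PySem.Dict.nodup_keys_ofList joueur
  have hsz : d.size = d.values.length := dict_size_eq_values_length d
  set n := d.values.length with hnn
  obtain ⟨i, hi, hvi⟩ := List.getElem_of_mem hvmem
  have hnz' : ∃ j : Nat, j < n ∧ d.values.getD j 0 ≠ 0 :=
    ⟨i, hi, by rw [List.getD_eq_getElem d.values 0 hi, hvi]; exact hvnz⟩
  have hn : 0 < n := by omega
  have hlo' : -(n : Int) - 1 ≤ tour := by rw [hsz] at hlo; exact_mod_cast hlo
  have hhi' : tour ≤ (n : Int) - 1 := by rw [hsz] at hhi; exact_mod_cast hhi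
  have hbnd : -(n : Int) ≤ advP (n : Int) tour ∧ advP (n : Int) tour < (n : Int) := by
    rw [advP]; split_ifs <;> omega
  have hcomp : completesB (2 * n + 1) d.values (advP (n : Int) tour) = true :=
    completes_of_exists d.values hnz' _ hbnd.1 hbnd.2
  have heq := loop_eq d hnd (2 * n + 1) tour hcomp
  rw [hsz]
  exact heq

-- ===== VERDICT (by name: the statement is the Claim_ definition above) =====
theorem cherche_tour_spec : Claim_equal_cherche_tour := by
  intro tour joueur _ hpre
  unfold Spec_cherche_tour
  exact main_equiv tour joueur hpre
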